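-- pv_equiv track=rewrite | github.com/Eugenia-Z/PracticalProblems | Others/Citadel/StableSegments.py | match_sub_array_result
-- ===== SOURCE A (Python) =====
-- def match_sub_array_result(capacity):
--     val_to_index = {}
--     n = len(capacity)
--     pre_sum = [0] * (n + 1)
--     for i in range(1, n + 1):
--         pre_sum[i] = pre_sum[i - 1] + capacity[i - 1]
--
--     ans = 0
--     for i in range(2, n):
--         val_to_index[capacity[i - 2]] = i - 1
--         if capacity[i] in val_to_index:
--             if pre_sum[i] - pre_sum[val_to_index[capacity[i]]] == capacity[i]:
--                 ans += 1
--
--     return ans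
-- ===== SOURCE B (Python) =====
-- def match_sub_array_result(capacity):
--     # Brute-force restatement: a position i counts iff the segment strictly between
--     # the NEAREST previous occurrence of capacity[i] (at or before i-2) and i sums
--     # to capacity[i].  Found by scanning backwards from i-1; no dict, no prefix array.
--     n = len(capacity)
--     ans = 0
--     for i in range(2, n):
--         c = capacity[i]
--         s = 0
--         for j in range(i - 1, 0, -1):
--             s += capacity[j]
--             if capacity[j - 1] == c:
--                 if s == c:
--                     ans += 1
--                 break
--     return ans
-- ===== Notes on version B (the rewrite author's own statement) =====
-- stated objective: alternative
-- what changed: B drops A's hash map and prefix-sum array entirely: for each position it scans backwards, accumulating the segment sum on the fly, until it meets the nearest previous occurrence of the current value, then compares that sum directly.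
import Mathlib
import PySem

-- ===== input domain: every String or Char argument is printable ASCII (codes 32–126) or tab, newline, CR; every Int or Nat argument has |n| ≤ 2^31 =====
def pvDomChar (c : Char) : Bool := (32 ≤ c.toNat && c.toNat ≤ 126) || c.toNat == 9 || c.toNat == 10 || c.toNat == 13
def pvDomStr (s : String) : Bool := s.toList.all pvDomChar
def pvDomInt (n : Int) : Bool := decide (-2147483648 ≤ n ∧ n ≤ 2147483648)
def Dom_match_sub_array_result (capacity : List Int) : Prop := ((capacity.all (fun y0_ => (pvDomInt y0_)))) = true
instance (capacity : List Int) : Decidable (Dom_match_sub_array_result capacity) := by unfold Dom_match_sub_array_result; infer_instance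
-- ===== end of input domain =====

-- B replaces A's hash map + prefix-sum array by a dict-free backward scan per position (alternative decomposition; same return value, no speed claim).


-- ===== PORT A =====
-- body of A's first loop: pre_sum[i] = pre_sum[i-1] + capacity[i-1]  (indices provably in range, so pyGetD/pySetD are exact)
def pvPreStep (capacity : List Int) (ps : List Int) (i : Int) : List Int :=
  PySem.List.pySetD ps i (PySem.List.pyGetD ps (i - 1) 0 + PySem.List.pyGetD capacity (i - 1) 0)

-- body of A's second loop over (val_to_index, ans)
def pvAStep (capacity pre_sum : List Int) (st : PySem.Dict Int Int × Int) (i : Int) :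
    PySem.Dict Int Int × Int :=
  let d := st.1.insert (PySem.List.pyGetD capacity (i - 2) 0) (i - 1)
  let c := PySem.List.pyGetD capacity i 0
  let ans :=
    if d.contains c then
      if PySem.List.pyGetD pre_sum i 0 - PySem.List.pyGetD pre_sum (d.getD c 0) 0 = c then st.2 + 1
      else st.2
    else st.2
  (d, ans)

def match_sub_array_result (capacity : List Int) : Int :=
  let n := PySem.List.len capacity
  let pre_sum :=
    (PySem.List.pyRange 1 (n + 1) 1).foldl (pvPreStep capacity)
      (List.replicate (capacity.length + 1) 0)
  ((PySem.List.pyRange 2 n 1).foldl (pvAStep capacity pre_sum) (PySem.Dict.empty, 0)).2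

-- ===== PORT B =====
-- B's inner backward loop over range(i-1, 0, -1): accumulate s, break at the first previous occurrence of c
def pvBScan (capacity : List Int) (c : Int) : List Int → Int → Int
  | [], _ => 0
  | j :: rest, s =>
      let s' := s + PySem.List.pyGetD capacity j 0
      if PySem.List.pyGetD capacity (j - 1) 0 = c then
        if s' = c then 1 else 0
      else pvBScan capacity c rest s'

-- B's outer loop body
def pvBOuter (capacity : List Int) (ans : Int) (i : Int) : Int :=
  ans + pvBScan capacity (PySem.List.pyGetD capacity i 0) (PySem.List.pyRange (i - 1) 0 (-1)) 0

def match_sub_array_result_alt (capacity : List Int) : Int :=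
  (PySem.List.pyRange 2 (PySem.List.len capacity) 1).foldl (pvBOuter capacity) 0

-- ===== PRECONDITION & SPEC =====
def Spec_match_sub_array_result (capacity : List Int) (out : Int) : Prop := out = match_sub_array_result_alt capacity
instance (capacity : List Int) (out : Int) : Decidable (Spec_match_sub_array_result capacity out) := by unfold Spec_match_sub_array_result; infer_instance

-- ===== CLAIM (what is proved, stated in full; the proofs are below) =====
def Claim_equal_match_sub_array_result : Prop := ∀ (capacity : List Int), Dom_match_sub_array_result capacity → Spec_match_sub_array_result capacity (match_sub_array_result capacity)

-- ===== LEMMAS AND PROOFS =====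

-- prefix sum of the first j elements (what A's pre_sum[j] holds)
def pvP (capacity : List Int) (j : Nat) : Int := (capacity.take j).sum

-- the list A's first loop produces
def pvPSL (capacity : List Int) : List Int :=
  (List.range (capacity.length + 1)).map (fun j => pvP capacity j)

-- largest k < t with capacity[k] = v (what A's dict records, shifted by one)
def pvLast (capacity : List Int) : Nat → Int → Option Nat
  | 0, _ => none
  | t + 1, v => if capacity.getD t 0 = v then some t else pvLast capacity t v

lemma pvPreFold_inv (capacity : List Int) (k : Nat) (hk : k ≤ capacity.length) :
    (PySem.List.pyRange 1 ((k : Int) + 1) 1).foldl (pvPreStep capacity)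
        (List.replicate (capacity.length + 1) 0)
      = (List.range (capacity.length + 1)).map
          (fun j => if j ≤ k then pvP capacity j else 0) := by
  induction k with
  | zero =>
      rw [PySem.List.pyRange_one_eq_nil (by omega)]
      simp only [List.foldl_nil]
      apply List.ext_getElem
      · simp
      · intro j h1 h2
        simp only [List.getElem_replicate, List.getElem_map, List.getElem_range]
        rcases Nat.eq_zero_or_pos j with h | h
        · simp [h, pvP]
        · rw [if_neg (by omega)]
  | succ k ih =>
      have hk' : k ≤ capacity.length := by omega
      have hr : PySem.List.pyRange 1 ((k : Int) + 1 + 1) 1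
          = PySem.List.pyRange 1 ((k : Int) + 1) 1 ++ [(k : Int) + 1] :=
        PySem.List.pyRange_one_succ_right (by omega)
      push_cast
      rw [hr, List.foldl_append, ih hk']
      simp only [List.foldl_cons, List.foldl_nil]
      unfold pvPreStep
      have hlen : ((List.range (capacity.length + 1)).map
          (fun j => if j ≤ k then pvP capacity j else 0)).length = capacity.length + 1 := by simp
      rw [PySem.List.pySetD_of_nonneg _ _ (by omega)]
      have hsub : (k : Int) + 1 - 1 = (k : Int) := by omega
      rw [hsub]
      have hget : PySem.List.pyGetD ((List.range (capacity.length + 1)).map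
          (fun j => if j ≤ k then pvP capacity j else 0)) (k : Int) 0 = pvP capacity k := by
        rw [PySem.List.pyGetD_eq_getElem _ 0 (by omega) (by rw [hlen]; push_cast; omega)]
        simp
      rw [hget]
      have hgetc : PySem.List.pyGetD capacity (k : Int) 0 = capacity[k]'(by omega) := by
        rw [PySem.List.pyGetD_eq_getElem _ 0 (by omega) (by omega)]
        simp
      rw [hgetc]
      apply List.ext_getElem
      · simp
      · intro j h1 h2
        have htn : ((k : Int) + 1).toNat = k + 1 := by omega
        simp only [htn, List.getElem_set, List.getElem_map, List.getElem_range]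
        by_cases hj : j = k + 1
        · rw [if_pos (by omega), if_pos (by omega)]
          subst hj
          rw [pvP, pvP, List.sum_take_succ _ _ (by omega)]
        · rw [if_neg (by omega)]
          by_cases hj2 : j ≤ k
          · rw [if_pos hj2, if_pos (by omega)]
          · rw [if_neg hj2, if_neg (by omega)]

lemma pvPreFold_eq (capacity : List Int) :
    (PySem.List.pyRange 1 ((capacity.length : Int) + 1) 1).foldl (pvPreStep capacity)
        (List.replicate (capacity.length + 1) 0)
      = pvPSL capacity := by
  have h := pvPreFold_inv capacity capacity.length le_rfl
  rw [h, pvPSL]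
  apply List.map_congr_left
  intro j hj
  have hj' := List.mem_range.mp hj
  rw [if_pos (by omega : j ≤ capacity.length)]

lemma pvLast_lt (capacity : List Int) (t : Nat) (v : Int) (k : Nat)
    (h : pvLast capacity t v = some k) : k < t := by
  induction t with
  | zero => simp [pvLast] at h
  | succ t ih =>
      rw [pvLast] at h
      by_cases hv : capacity.getD t 0 = v
      · rw [if_pos hv] at h; injection h with h; omega
      · rw [if_neg hv] at h; have := ih h; omega

lemma pvP_succ (capacity : List Int) (m : Nat) (hm : m < capacity.length) :
    pvP capacity (m + 1) = pvP capacity m + capacity.getD m 0 := by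
  rw [pvP, pvP, List.sum_take_succ _ _ hm, List.getD_eq_getElem _ _ hm]

-- B's backward scan, characterised by the nearest previous occurrence
lemma pvBScan_char (capacity : List Int) (c : Int) (m : Nat) (hm : m = 0 ∨ m < capacity.length) :
    ∀ s, pvBScan capacity c (PySem.List.pyRange (m : Int) 0 (-1)) s
      = (match pvLast capacity m c with
         | none => 0
         | some k => if s + (pvP capacity (m + 1) - pvP capacity (k + 1)) = c then 1 else 0) := by
  induction m with
  | zero =>
      intro s
      rw [PySem.List.pyRange_neg_one_eq_nil (by omega)]
      simp [pvBScan, pvLast]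
  | succ m ih =>
      intro s
      have hlen : m + 1 < capacity.length := by omega
      have hcons : PySem.List.pyRange ((m + 1 : Nat) : Int) 0 (-1)
          = ((m + 1 : Nat) : Int) :: PySem.List.pyRange (((m + 1 : Nat) : Int) - 1) 0 (-1) :=
        PySem.List.pyRange_neg_one_cons (by push_cast; omega)
      rw [hcons]
      simp only [pvBScan]
      have hsub : ((m + 1 : Nat) : Int) - 1 = (m : Int) := by push_cast; omega
      have hgm1 : PySem.List.pyGetD capacity ((m + 1 : Nat) : Int) 0 = capacity.getD (m + 1) 0 :=
        PySem.List.pyGetD_natCast _ _ _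
      have hgm : PySem.List.pyGetD capacity (m : Int) 0 = capacity.getD m 0 :=
        PySem.List.pyGetD_natCast _ _ _
      have hPstep : pvP capacity (m + 1 + 1) = pvP capacity (m + 1) + capacity.getD (m + 1) 0 :=
        pvP_succ capacity (m + 1) hlen
      rw [hsub, hgm1, hgm]
      by_cases hv : capacity.getD m 0 = c
      · rw [if_pos hv]
        have hL : pvLast capacity (m + 1) c = some m := by rw [pvLast, if_pos hv]
        rw [hL]
        have hred : (match (some m : Option Nat) with
            | none => (0 : Int)
            | some k => if s + (pvP capacity (m + 1 + 1) - pvP capacity (k + 1)) = c then 1 else 0)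
            = if s + (pvP capacity (m + 1 + 1) - pvP capacity (m + 1)) = c then 1 else 0 := rfl
        rw [hred]
        exact if_congr ⟨fun h => by rw [hPstep]; omega, fun h => by rw [hPstep] at h; omega⟩ rfl rfl
      · rw [if_neg hv]
        have hL : pvLast capacity (m + 1) c = pvLast capacity m c := by rw [pvLast, if_neg hv]
        rw [hL, ih (by omega) (s + capacity.getD (m + 1) 0)]
        cases hLm : pvLast capacity m c with
        | none => rfl
        | some k =>
            have : s + capacity.getD (m + 1) 0 + (pvP capacity (m + 1) - pvP capacity (k + 1))
                = s + (pvP capacity (m + 1 + 1) - pvP capacity (k + 1)) := by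
              rw [hPstep]; ring
            simp only [this]

-- main invariant: after t iterations A's answer equals B's, and A's dict is pvLast shifted by one
lemma pvAB_inv (capacity : List Int) (t : Nat) (ht : 2 + t ≤ capacity.length) :
    letI stA := (PySem.List.pyRange 2 (2 + (t : Int)) 1).foldl
      (pvAStep capacity (pvPSL capacity)) (PySem.Dict.empty, 0)
    stA.2 = (PySem.List.pyRange 2 (2 + (t : Int)) 1).foldl (pvBOuter capacity) 0 ∧
      (∀ v, stA.1.get? v = (pvLast capacity t v).map (fun k => (k : Int) + 1)) := by
  induction t with
  | zero =>
      rw [show ((2 : Int) + ((0 : Nat) : Int)) = 2 by norm_num,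
        PySem.List.pyRange_one_eq_nil (by omega)]
      simp only [List.foldl_nil]
      refine ⟨by trivial, fun v => by simp [PySem.Dict.get?_empty, pvLast]⟩
  | succ t ih =>
      have ht' : 2 + t ≤ capacity.length := by omega
      obtain ⟨hans, hget⟩ := ih ht'
      have hcast : ((2 : Int) + ((t + 1 : Nat) : Int)) = (2 + ((t : Nat) : Int)) + 1 := by
        push_cast; ring
      rw [hcast, PySem.List.pyRange_one_succ_right (by omega), List.foldl_append, List.foldl_append,
        List.foldl_cons, List.foldl_cons, List.foldl_nil, List.foldl_nil]
      set sA := (PySem.List.pyRange 2 (2 + (t : Int)) 1).foldl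
        (pvAStep capacity (pvPSL capacity)) (PySem.Dict.empty, 0) with hsA
      set bA := (PySem.List.pyRange 2 (2 + (t : Int)) 1).foldl (pvBOuter capacity) 0 with hbA
      set i : Int := 2 + (t : Int) with hi
      have hi2 : i - 2 = ((t : Nat) : Int) := by omega
      have hi1 : i - 1 = ((t + 1 : Nat) : Int) := by push_cast; omega
      have hiN : i = ((2 + t : Nat) : Int) := by push_cast; omega
      have hk0 : PySem.List.pyGetD capacity (i - 2) 0 = capacity.getD t 0 := by
        rw [hi2, PySem.List.pyGetD_natCast]
      set c : Int := PySem.List.pyGetD capacity i 0 with hc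
      -- new dict invariant
      have hgetNew : ∀ v, (sA.1.insert (PySem.List.pyGetD capacity (i - 2) 0) (i - 1)).get? v
          = (pvLast capacity (t + 1) v).map (fun k => (k : Int) + 1) := by
        intro v
        rw [PySem.Dict.get?_insert, hk0, pvLast]
        by_cases hv : v = capacity.getD t 0
        · rw [if_pos hv, if_pos hv.symm]
          have hi1' : i - 1 = (t : Int) + 1 := by omega
          rw [hi1']
          rfl
        · rw [if_neg hv, if_neg (fun h => hv h.symm), hget]
      constructor
      · -- answers agree after the new step
        simp only [pvAStep, pvBOuter]
        rw [← hc]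
        have hscan : pvBScan capacity c (PySem.List.pyRange (i - 1) 0 (-1)) 0
            = (match pvLast capacity (t + 1) c with
               | none => 0
               | some k => if 0 + (pvP capacity (t + 1 + 1) - pvP capacity (k + 1)) = c then 1
                           else 0) := by
          rw [hi1]; exact pvBScan_char capacity c (t + 1) (by omega) 0
        cases hL : pvLast capacity (t + 1) c with
        | none =>
            have hC : (sA.1.insert (PySem.List.pyGetD capacity (i - 2) 0) (i - 1)).contains c
                = false := by
              rw [PySem.Dict.contains_eq_isSome_get?, hgetNew c, hL]; rfl
            rw [hC, hscan, hL, hans]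
            rw [if_neg (by simp : ¬(false = true))]
            show bA = bA + 0
            omega
        | some k =>
            have hklt : k < t + 1 := pvLast_lt capacity (t + 1) c k hL
            have hC : (sA.1.insert (PySem.List.pyGetD capacity (i - 2) 0) (i - 1)).contains c
                = true := by
              rw [PySem.Dict.contains_eq_isSome_get?, hgetNew c, hL]; rfl
            have hD : (sA.1.insert (PySem.List.pyGetD capacity (i - 2) 0) (i - 1)).getD c 0
                = (k : Int) + 1 := by
              apply PySem.Dict.getD_of_get?_eq_some _ 0
              rw [hgetNew c, hL]; rfl
            have hPSi : PySem.List.pyGetD (pvPSL capacity) i 0 = pvP capacity (2 + t) := by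
              rw [hiN, PySem.List.pyGetD_natCast, pvPSL]
              rw [List.getD_eq_getElem _ _ (by simp; omega)]
              simp
            have hPSk : PySem.List.pyGetD (pvPSL capacity) ((k : Int) + 1) 0
                = pvP capacity (k + 1) := by
              rw [show ((k : Int) + 1) = ((k + 1 : Nat) : Int) by push_cast; ring,
                PySem.List.pyGetD_natCast, pvPSL]
              rw [List.getD_eq_getElem _ _ (by simp; omega)]
              simp
            rw [hC, hD, hPSi, hPSk, hscan, hL, hans]
            have hred : (match (some k : Option Nat) with
                | none => (0 : Int)
                | some k => if 0 + (pvP capacity (t + 1 + 1) - pvP capacity (k + 1)) = c then 1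
                            else 0)
                = if 0 + (pvP capacity (t + 1 + 1) - pvP capacity (k + 1)) = c then 1 else 0 := rfl
            rw [hred, if_pos rfl]
            have h22 : t + 1 + 1 = 2 + t := by omega
            rw [h22]
            by_cases hcond : pvP capacity (2 + t) - pvP capacity (k + 1) = c
            · rw [if_pos hcond, if_pos (by omega)]
            · rw [if_neg hcond, if_neg (by omega)]
              omega
      · -- dict invariant
        simpa only [pvAStep] using hgetNew

-- ===== VERDICT (by name: the statement is the Claim_ definition above) =====
theorem match_sub_array_result_spec : Claim_equal_match_sub_array_result := by
  intro capacity _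
  simp only [Spec_match_sub_array_result, match_sub_array_result, match_sub_array_result_alt,
    PySem.List.len_eq]
  by_cases h2 : (capacity.length : Int) ≤ 2
  · rw [PySem.List.pyRange_one_eq_nil h2]
    simp
  · rw [pvPreFold_eq capacity]
    have ht : 2 + (capacity.length - 2) ≤ capacity.length := by omega
    have h := pvAB_inv capacity (capacity.length - 2) ht
    have hc : ((2 : Int) + ((capacity.length - 2 : Nat) : Int)) = (capacity.length : Int) := by omega
    rw [hc] at h
    exact h.1
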